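-- pv_equiv track=rewrite | github.com/sullivai/match | match/matchfunctions.py | getWorst
-- ===== SOURCE A (Python) =====
-- def getWorst(matched, shiftpreflist):
--     worst = None
--     rank = len(shiftpreflist)  #0
--     for ling in matched:
--         try:
--             if shiftpreflist.index(ling) < rank:
--             #if shiftpreflist.index(ling) >= rank:  # valueError if not in list
--                 rank = shiftpreflist.index(ling)
--                 worst = ling
--         except:
--             continue
--     return worst
-- ===== SOURCE B (Python) =====
-- def getWorst(matched, shiftpreflist):
--     # First-hit scan over shiftpreflist: the earliest value that is matched
--     # is exactly the one with the lowest shiftpreflist index.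
--     for v in shiftpreflist:
--         if v in matched:
--             return v
--     return None
-- ===== Notes on version B (the rewrite author's own statement) =====
-- stated objective: faster
-- what changed: Replaces the running-minimum scan over matched (two O(n) list.index scans per matched element) by a single first-hit scan over shiftpreflist in natural order that returns the first value present in matched.
import Mathlib
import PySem

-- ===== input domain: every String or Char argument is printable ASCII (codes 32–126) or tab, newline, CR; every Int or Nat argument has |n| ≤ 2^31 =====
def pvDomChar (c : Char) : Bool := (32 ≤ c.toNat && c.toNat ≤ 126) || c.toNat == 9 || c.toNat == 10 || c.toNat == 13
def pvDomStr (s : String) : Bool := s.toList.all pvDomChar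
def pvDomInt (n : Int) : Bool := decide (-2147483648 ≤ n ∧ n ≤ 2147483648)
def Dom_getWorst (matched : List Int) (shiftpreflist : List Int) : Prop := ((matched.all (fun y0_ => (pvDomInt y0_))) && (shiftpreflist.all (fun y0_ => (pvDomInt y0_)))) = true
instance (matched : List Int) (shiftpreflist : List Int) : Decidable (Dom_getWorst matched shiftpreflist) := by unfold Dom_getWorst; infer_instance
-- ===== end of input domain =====

-- B replaces A's running-minimum scan over matched with a first-hit scan over
-- shiftpreflist in natural order; objective: simpler. Return values only (no mutation).

-- ===== PORT A =====
-- one iteration of A's for-loop body: state = (worst, rank)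
def pvStepA (shiftpreflist : List Int) (st : Option Int × Nat) (ling : Int) : Option Int × Nat :=
  match PySem.List.index? shiftpreflist ling with
  | some i => if i < st.2 then (some ling, i) else st   -- the try-branch; index twice computes the same value
  | none   => st                                        -- ValueError → except: continue

def getWorst (matched : List Int) (shiftpreflist : List Int) : Option Int :=
  (matched.foldl (pvStepA shiftpreflist) (none, shiftpreflist.length)).1

-- ===== PORT B =====
def getWorst_alt (matched : List Int) (shiftpreflist : List Int) : Option Int :=
  match shiftpreflist with
  | [] => none
  | v :: rest => if matched.contains v then some v else getWorst_alt matched rest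

-- ===== PRECONDITION & SPEC =====
def Spec_getWorst (matched : List Int) (shiftpreflist : List Int) (out : Option Int) : Prop := out = getWorst_alt matched shiftpreflist
instance (matched : List Int) (shiftpreflist : List Int) (out : Option Int) : Decidable (Spec_getWorst matched shiftpreflist out) := by unfold Spec_getWorst; infer_instance

-- ===== CLAIM (what is proved, stated in full; the proofs are below) =====
def Claim_equal_getWorst : Prop := ∀ (matched : List Int) (shiftpreflist : List Int), Dom_getWorst matched shiftpreflist → Spec_getWorst matched shiftpreflist (getWorst matched shiftpreflist)

-- ===== LEMMAS AND PROOFS =====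

lemma alt_eq_head_filter (matched : List Int) : ∀ (pref : List Int),
    getWorst_alt matched pref = (pref.filter (fun v => matched.contains v)).head? := by
  intro pref
  induction pref with
  | nil => simp [getWorst_alt]
  | cons v rest ih =>
    by_cases h : v ∈ matched
    · simp [getWorst_alt, h]
    · simp [getWorst_alt, h, ih]

lemma fold_key (pref : List Int) : ∀ (xs : List Int) (w : Option Int) (r : Nat),
    (xs.foldl (pvStepA pref) (w, r)).1
      = ((pref.take r).filter (fun v => xs.contains v)).head?.or w := by
  intro xs
  induction xs with
  | nil => intro w r; simp
  | cons x xs ih =>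
    intro w r
    rw [List.foldl_cons]
    show ((xs.foldl (pvStepA pref) (pvStepA pref (w, r) x))).1 = _
    rcases hidx : PySem.List.index? pref x with _ | i
    · -- x ∉ pref
      have hnot : x ∉ pref := (PySem.List.index?_eq_none_iff _ _).1 hidx
      have hcongr : (pref.take r).filter (fun v => (x :: xs).contains v)
          = (pref.take r).filter (fun v => xs.contains v) := by
        apply List.filter_congr
        intro v hv
        have : v ∈ pref := List.mem_of_mem_take hv
        have hne : v ≠ x := by rintro rfl; exact hnot this
        simp [hne]
      simp only [pvStepA, hidx]
      rw [ih, hcongr]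
    · obtain ⟨pre, suf, hsplit, hlen, hxpre⟩ := (PySem.List.index?_eq_some_iff _ _ _).1 hidx
      by_cases hir : i < r
      · -- take the branch: new state (some x, i)
        simp only [pvStepA, hidx, if_pos hir]
        rw [ih]
        -- pref.take i = pre
        have htakei : pref.take i = pre := by
          rw [hsplit]; exact List.take_left' hlen
        -- pref.take r = pre ++ x :: suf.take (r - i - 1)
        have htaker : pref.take r = pre ++ x :: suf.take (r - i - 1) := by
          rw [hsplit, List.take_append, ← hlen]
          congr 1
          · exact List.take_of_length_le (by omega)
          · have : r - pre.length = (r - i - 1) + 1 := by omega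
            rw [this, List.take_succ_cons]; simp
        have hcongr : pre.filter (fun v => (x :: xs).contains v)
            = pre.filter (fun v => xs.contains v) := by
          apply List.filter_congr
          intro v hv
          have hne : v ≠ x := by rintro rfl; exact hxpre hv
          simp [hne]
        rw [htakei, htaker, List.filter_append, List.head?_append, List.filter_cons,
            hcongr]
        simp only [List.contains_cons, BEq.rfl, Bool.true_or, if_pos]
        cases (pre.filter (fun v => xs.contains v)).head? <;> simp
      · -- i ≥ r: first occurrence of x is outside the window, x ∉ pref.take r
        have hnot : x ∉ pref.take r := by
          intro hmem
          have hr : r ≤ pre.length := by omega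
          rw [hsplit, List.take_append_of_le_length hr] at hmem
          exact hxpre (List.mem_of_mem_take hmem)
        have hcongr : (pref.take r).filter (fun v => (x :: xs).contains v)
            = (pref.take r).filter (fun v => xs.contains v) := by
          apply List.filter_congr
          intro v hv
          have hne : v ≠ x := by rintro rfl; exact hnot hv
          simp [hne]
        simp only [pvStepA, hidx, if_neg hir]
        rw [ih, hcongr]

-- ===== VERDICT (by name: the statement is the Claim_ definition above) =====
theorem getWorst_spec : Claim_equal_getWorst := by
  intro matched pref _
  unfold Spec_getWorst getWorst
  rw [fold_key, alt_eq_head_filter, List.take_length]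
  cases (pref.filter (fun v => matched.contains v)).head? <;> simp
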